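-- pv_equiv track=rewrite | github.com/kkr010128/codebert | problem152/problem152_42.py | check
-- ===== SOURCE A (Python) =====
-- def check(A):
--   th = 0 #高さの合計
--   for i in range(len(A)):
--     b = A[i][0]
--     h = A[i][1]
--     if th + b < 0:
--       return False
--     else:
--       th += h
--   return True
-- ===== SOURCE B (Python) =====
-- def check(A):
--     # prefix[i] = sum of heights A[j][1] before index i
--     s = 0
--     prefix = []
--     for _, h in A:
--         prefix.append(s)
--         s += h
--     return all(p + b >= 0 for p, (b, _) in zip(prefix, A))
-- ===== Notes on version B (the rewrite author's own statement) =====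
-- stated objective: alternative
-- what changed: B replaces A's inline running-accumulator loop with early return by a prefix-sum table built in one pass followed by a separate all() predicate scan over zip(prefix, A).
import Mathlib
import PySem

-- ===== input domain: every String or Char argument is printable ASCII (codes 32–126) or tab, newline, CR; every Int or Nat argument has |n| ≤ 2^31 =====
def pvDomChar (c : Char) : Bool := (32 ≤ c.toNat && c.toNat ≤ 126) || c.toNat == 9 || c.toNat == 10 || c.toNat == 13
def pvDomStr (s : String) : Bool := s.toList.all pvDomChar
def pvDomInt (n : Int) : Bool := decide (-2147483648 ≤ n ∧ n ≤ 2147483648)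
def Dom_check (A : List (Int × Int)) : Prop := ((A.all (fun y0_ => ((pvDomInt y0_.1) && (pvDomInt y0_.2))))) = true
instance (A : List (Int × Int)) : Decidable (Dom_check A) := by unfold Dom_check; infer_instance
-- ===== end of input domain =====

-- B replaces A's running-accumulator early-return loop by a prefix-sum table plus a separate all-scan; alternative decomposition, same O(n) cost.


-- ===== PORT A =====
-- loop: for each (b,h): if th + b < 0 return False else th += h
def checkGo : List (Int × Int) → Int → Bool
  | [], _ => true
  | (b, h) :: rest, th => if th + b < 0 then false else checkGo rest (th + h)

def check (A : List (Int × Int)) : Bool := checkGo A 0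

-- ===== PORT B =====
-- first pass: build prefix table (state = (running sum s, prefix list))
def buildPrefix (A : List (Int × Int)) : List Int :=
  (A.foldl (fun (st : Int × List Int) x => (st.1 + x.2, st.2 ++ [st.1])) (0, [])).2

-- second pass: all(p + b >= 0 for p, (b, _) in zip(prefix, A))
def check_alt (A : List (Int × Int)) : Bool :=
  ((buildPrefix A).zip A).all (fun pa => decide (pa.1 + pa.2.1 ≥ 0))

-- ===== PRECONDITION & SPEC =====
def Spec_check (A : List (Int × Int)) (out : Bool) : Prop := out = check_alt A
instance (A : List (Int × Int)) (out : Bool) : Decidable (Spec_check A out) := by unfold Spec_check; infer_instance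

-- ===== CLAIM =====
def Claim_equal_check : Prop := ∀ (A : List (Int × Int)), Dom_check A → Spec_check A (check A)

-- ===== LEMMAS AND PROOFS =====
-- the mathematical prefix scan starting at s
def scanFrom (s : Int) : List (Int × Int) → List Int
  | [] => []
  | (_, h) :: rest => s :: scanFrom (s + h) rest

theorem buildPrefix_go (A : List (Int × Int)) (s : Int) (acc : List Int) :
    (A.foldl (fun (st : Int × List Int) x => (st.1 + x.2, st.2 ++ [st.1])) (s, acc)).2
      = acc ++ scanFrom s A := by
  induction A generalizing s acc with
  | nil => simp [scanFrom]
  | cons x rest ih =>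
    obtain ⟨b, h⟩ := x
    simp [List.foldl, scanFrom, ih, List.append_assoc]

theorem buildPrefix_eq (A : List (Int × Int)) : buildPrefix A = scanFrom 0 A := by
  simpa using buildPrefix_go A 0 []

theorem checkGo_eq_all (A : List (Int × Int)) (th : Int) :
    checkGo A th = ((scanFrom th A).zip A).all (fun pa => decide (pa.1 + pa.2.1 ≥ 0)) := by
  induction A generalizing th with
  | nil => simp [checkGo, scanFrom]
  | cons x rest ih =>
    obtain ⟨b, h⟩ := x
    by_cases hc : th + b < 0
    · simp [checkGo, scanFrom, hc, show ¬ (th + b ≥ 0) by omega]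
    · simp [checkGo, scanFrom, hc, show th + b ≥ 0 by omega, ih]

-- ===== VERDICT =====
theorem check_spec : Claim_equal_check := by
  intro A _
  unfold Spec_check check check_alt
  rw [buildPrefix_eq, checkGo_eq_all]
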